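-- pv_equiv track=rewrite | github.com/Surprior/webserver | maghttp.py | splitReq
-- ===== SOURCE A (Python) =====
-- def splitReq(str):
-- 	lines = str.splitlines()
-- 	before = True
-- 	h = []
-- 	b = []
-- 	for line in lines:
-- 		if line != '':
-- 			if before:
-- 				h.append(line)
-- 			else:
-- 				b.append(line)
-- 		else:
-- 			before = False
-- 	return h, "".join(b)
-- ===== SOURCE B (Python) =====
-- def splitReq(str):
-- 	lines = str.splitlines()
-- 	try:
-- 		idx = lines.index('')
-- 	except ValueError:
-- 		return lines, ''
-- 	return lines[:idx], ''.join(l for l in lines[idx + 1:] if l != '')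
-- ===== Notes on version B (the rewrite author's own statement) =====
-- stated objective: alternative
-- what changed: Replaces the boolean-flag single loop over all lines with a locate-then-partition decomposition: find the first blank line with list.index, take the slice before it as headers and join the non-empty lines of the slice after it as the body.
import Mathlib
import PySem

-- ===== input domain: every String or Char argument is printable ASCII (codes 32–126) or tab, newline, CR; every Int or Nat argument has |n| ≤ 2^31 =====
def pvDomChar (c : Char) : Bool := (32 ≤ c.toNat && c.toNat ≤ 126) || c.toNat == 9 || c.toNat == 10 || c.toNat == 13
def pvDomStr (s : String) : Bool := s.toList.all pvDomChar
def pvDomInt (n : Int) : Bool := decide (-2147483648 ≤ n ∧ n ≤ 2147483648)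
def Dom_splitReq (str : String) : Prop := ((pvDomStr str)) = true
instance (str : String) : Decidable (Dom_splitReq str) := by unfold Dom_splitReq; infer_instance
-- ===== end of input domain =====

-- B replaces A's boolean-flag loop by locating the first blank line and partitioning around it; same cost, different decomposition.

-- ===== PORT A =====
-- A's loop state: (before, h, b); each line is appended to h or b, or flips the flag.
def splitReqStep (s : Bool × List String × List String) (line : String) :
    Bool × List String × List String :=
  if line ≠ "" then
    if s.1 then (s.1, s.2.1 ++ [line], s.2.2) else (s.1, s.2.1, s.2.2 ++ [line])
  else (false, s.2.1, s.2.2)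

def splitReq (str : String) : List String × String :=
  let lines := PySem.Str.splitlines str
  let st := lines.foldl splitReqStep (true, [], [])
  (st.2.1, PySem.Str.join "" st.2.2)

-- ===== PORT B =====
def splitReq_alt (str : String) : List String × String :=
  let lines := PySem.Str.splitlines str
  match PySem.List.index? lines "" with
  | none => (lines, "")
  | some idx =>
      (PySem.List.slice lines none (some (idx : Int)),
       PySem.Str.join ""
         ((PySem.List.slice lines (some ((idx : Int) + 1)) none).filter (· ≠ "")))

-- ===== PRECONDITION & SPEC =====
def Spec_splitReq (str : String) (out : List String × String) : Prop := out = splitReq_alt str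
instance (str : String) (out : List String × String) : Decidable (Spec_splitReq str out) := by unfold Spec_splitReq; infer_instance

-- ===== CLAIM (what is proved, stated in full; the proofs are below) =====
def Claim_equal_splitReq : Prop := ∀ (str : String), Dom_splitReq str → Spec_splitReq str (splitReq str)

-- ===== LEMMAS AND PROOFS =====

-- Before any blank line, every (non-empty) line is appended to h.
theorem foldl_step_no_blank (lines : List String) (h b : List String)
    (hnb : "" ∉ lines) :
    lines.foldl splitReqStep (true, h, b) = (true, h ++ lines, b) := by
  induction lines generalizing h with
  | nil => simp
  | cons x xs ih =>
      have hx : x ≠ "" := fun hx => hnb (hx ▸ List.mem_cons_self)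
      have hxs : "" ∉ xs := fun hm => hnb (List.mem_cons_of_mem _ hm)
      simp only [List.foldl_cons, splitReqStep, ne_eq, hx, not_false_eq_true, if_true,
        if_pos rfl, ih _ hxs]
      simp

-- After the flag has flipped, h is frozen and b collects the non-empty lines.
theorem foldl_step_after_blank (lines : List String) (h b : List String) :
    lines.foldl splitReqStep (false, h, b) = (false, h, b ++ lines.filter (· ≠ "")) := by
  induction lines generalizing b with
  | nil => simp
  | cons x xs ih =>
      by_cases hx : x = ""
      · subst hx
        simp only [List.foldl_cons, splitReqStep, ne_eq, not_true_eq_false, if_false, ih]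
        simp
      · simp only [List.foldl_cons, splitReqStep, if_pos hx, Bool.false_eq_true, if_false, ih]
        simp [hx]

-- The loop of A equals B's locate-then-partition, stated on the line list.
theorem splitReq_key (lines : List String) :
    ((lines.foldl splitReqStep (true, [], [])).2.1,
      PySem.Str.join "" (lines.foldl splitReqStep (true, [], [])).2.2) =
    (match PySem.List.index? lines "" with
     | none => (lines, "")
     | some idx =>
        (PySem.List.slice lines none (some (idx : Int)),
         PySem.Str.join ""
           ((PySem.List.slice lines (some ((idx : Int) + 1)) none).filter (· ≠ "")))) := by
  cases hidx : PySem.List.index? lines "" with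
  | none =>
      have hnb : "" ∉ lines := (PySem.List.index?_eq_none_iff _ _).mp hidx
      rw [foldl_step_no_blank lines [] [] hnb]
      rfl
  | some idx =>
      obtain ⟨pre, suf, hls, hlen, hnb⟩ := (PySem.List.index?_eq_some_iff _ _ _).mp hidx
      subst hls
      rw [List.foldl_append, foldl_step_no_blank pre [] [] hnb]
      simp only [List.foldl_cons, splitReqStep, ne_eq, not_true_eq_false, if_false,
        foldl_step_after_blank]
      have h1 : PySem.List.slice (pre ++ "" :: suf) none (some (idx : Int)) = pre := by
        rw [PySem.List.slice_to_natCast]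
        subst hlen
        simp
      have h2 : PySem.List.slice (pre ++ "" :: suf) (some ((idx : Int) + 1)) none = suf := by
        have hc : ((idx : Int) + 1) = ((idx + 1 : Nat) : Int) := by push_cast; ring
        rw [hc, PySem.List.slice_from_natCast]
        subst hlen
        simp [List.drop_append]
      rw [h1, h2]
      simp

-- ===== VERDICT (by name: the statement is the Claim_ definition above) =====
theorem splitReq_spec : Claim_equal_splitReq := by
  intro str _
  exact splitReq_key (PySem.Str.splitlines str)
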